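-- pv_equiv track=rewrite | github.com/go-hare/reachy_mini | src/ccmini/services/session_memory.py | analyze_section_sizes
-- ===== SOURCE A (Python) =====
-- def analyze_section_sizes(content: str) -> dict[str, int]:
--     """Parse session memory by markdown headings and return character counts.
--
--     Returns a dict mapping ``# Section Name`` → character count of the
--     body text under that heading. Used to detect sections growing too
--     large (see :func:`generate_section_reminders`).
--     """
--     sections: dict[str, int] = {}
--     lines = content.split("\n")
--     current_section = ""
--     current_lines: list[str] = []
--
--     for line in lines:
--         if line.startswith("# "):
--             if current_section:
--                 text = "\n".join(current_lines).strip()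
--                 sections[current_section] = len(text)
--             current_section = line
--             current_lines = []
--         else:
--             current_lines.append(line)
--
--     if current_section:
--         text = "\n".join(current_lines).strip()
--         sections[current_section] = len(text)
--
--     return sections
-- ===== SOURCE B (Python) =====
-- def analyze_section_sizes(content: str) -> dict[str, int]:
--     """Group the lines into (heading, body-span) chunks and measure each span."""
--     lines = content.split("\n")
--     # skip everything before the first heading
--     while lines and not lines[0].startswith("# "):
--         lines = lines[1:]
--     sections: dict[str, int] = {}
--     while lines:
--         head, rest = lines[0], lines[1:]
--         body = []
--         while rest and not rest[0].startswith("# "):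
--             body.append(rest[0])
--             rest = rest[1:]
--         sections[head] = len("\n".join(body).strip())
--         lines = rest
--     return sections
-- ===== Notes on version B (the rewrite author's own statement) =====
-- stated objective: simpler
-- what changed: B replaces A's line-by-line accumulator with carried (current_section, current_lines) state and a final flush by a span-based grouping: skip the preamble, then repeatedly take one heading and its whole body span at once, so no pending state or end-of-loop flush exists.
import Mathlib
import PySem

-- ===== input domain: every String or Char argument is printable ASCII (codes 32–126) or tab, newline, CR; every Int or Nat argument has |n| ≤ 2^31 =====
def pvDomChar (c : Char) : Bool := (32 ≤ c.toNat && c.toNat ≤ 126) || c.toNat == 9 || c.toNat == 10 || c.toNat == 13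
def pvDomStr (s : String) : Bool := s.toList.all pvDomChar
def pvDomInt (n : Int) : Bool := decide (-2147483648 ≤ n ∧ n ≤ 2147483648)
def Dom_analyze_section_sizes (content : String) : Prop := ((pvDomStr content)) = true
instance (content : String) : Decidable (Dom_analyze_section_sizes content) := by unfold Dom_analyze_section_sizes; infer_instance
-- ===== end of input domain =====

-- B replaces A's one-pass accumulator (pending section + pending lines + final flush) by a
-- span-based grouping: skip the preamble, then repeatedly consume one heading and its whole
-- body span; objective: simpler (no pending state, no end-of-loop flush). Same cost.

-- ===== PORT A =====
-- loop body of A's 'for line in lines' over the state (sections, current_section, current_lines)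
def pvStepA (st : PySem.Dict String Int × String × List String) (line : String) :
    PySem.Dict String Int × String × List String :=
  if PySem.Str.startswith line "# " then
    if st.2.1 ≠ "" then
      (st.1.insert st.2.1 (PySem.Str.len (PySem.Str.strip (PySem.Str.join "\n" st.2.2))), line, ([] : List String))
    else
      (st.1, line, ([] : List String))
  else
    (st.1, st.2.1, st.2.2 ++ [line])

-- the trailing 'if current_section: sections[current_section] = …' after the loop
def pvFlushA (st : PySem.Dict String Int × String × List String) : PySem.Dict String Int :=
  if st.2.1 ≠ "" then
    st.1.insert st.2.1 (PySem.Str.len (PySem.Str.strip (PySem.Str.join "\n" st.2.2)))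
  else
    st.1

-- content.split("\n"): split? is always 'some' here since the separator "\n" is non-empty
def analyze_section_sizes (content : String) : List (String × Int) :=
  (pvFlushA (((PySem.Str.split? content "\n").getD []).foldl pvStepA (PySem.Dict.empty, "", []))).items

-- ===== PORT B =====
def pvIsHead (l : String) : Bool := PySem.Str.startswith l "# "

def pvBodyLen (body : List String) : Int :=
  PySem.Str.len (PySem.Str.strip (PySem.Str.join "\n" body))

-- 'while lines:' — take the heading, take its whole body span, store, continue after the span
def pvWalk : List String → PySem.Dict String Int → PySem.Dict String Int
  | [], acc => acc
  | h :: rest, acc =>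
      pvWalk (rest.dropWhile (fun l => !pvIsHead l))
             (acc.insert h (pvBodyLen (rest.takeWhile (fun l => !pvIsHead l))))
termination_by lines _ => lines.length
decreasing_by
  have := List.length_dropWhile_le (fun l => !pvIsHead l) rest
  simp; omega

def analyze_section_sizes_alt (content : String) : List (String × Int) :=
  (pvWalk (((PySem.Str.split? content "\n").getD []).dropWhile (fun l => !pvIsHead l)) PySem.Dict.empty).items

-- ===== PRECONDITION & SPEC =====
def Spec_analyze_section_sizes (content : String) (out : List (String × Int)) : Prop := out = analyze_section_sizes_alt content
instance (content : String) (out : List (String × Int)) : Decidable (Spec_analyze_section_sizes content out) := by unfold Spec_analyze_section_sizes; infer_instance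

-- ===== CLAIM (what is proved, stated in full; the proofs are below) =====
def Claim_equal_analyze_section_sizes : Prop := ∀ (content : String), Dom_analyze_section_sizes content → Spec_analyze_section_sizes content (analyze_section_sizes content)

-- ===== LEMMAS AND PROOFS =====

-- a heading line is never the empty string, so A's truthiness test on it always fires
theorem pvIsHead_ne_empty {l : String} (h : pvIsHead l = true) : l ≠ "" := by
  intro hl; subst hl; exact absurd h (by decide)

-- A's fold from a state with a pending heading h and pending body cs equals B's walk on the
-- remaining lines, with the body span of h being cs followed by the non-heading prefix
theorem pvFoldA_pending (lines : List String) :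
    ∀ (acc : PySem.Dict String Int) (h : String) (cs : List String), pvIsHead h = true →
    pvFlushA (lines.foldl pvStepA (acc, h, cs)) =
      pvWalk (lines.dropWhile (fun l => !pvIsHead l))
             (acc.insert h (pvBodyLen (cs ++ lines.takeWhile (fun l => !pvIsHead l)))) := by
  induction lines with
  | nil =>
      intro acc h cs hh
      simp [pvFlushA, pvWalk, pvIsHead_ne_empty hh, pvBodyLen]
  | cons line rest ih =>
      intro acc h cs hh
      by_cases hl : pvIsHead line = true
      · have hc : PySem.Chars.startswith line.toList ['#', ' '] = true := by
          simpa [pvIsHead] using hl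
        simp only [List.foldl_cons, pvStepA, pvIsHead] at *
        rw [hl]
        simp only [pvIsHead_ne_empty hh, ne_eq, not_false_iff, if_pos]
        rw [ih _ line [] hl]
        simp [hc, pvWalk, pvBodyLen, pvIsHead]
      · have hl' : pvIsHead line = false := by simpa using hl
        have hc : PySem.Chars.startswith line.toList ['#', ' '] = false := by
          simpa [pvIsHead] using hl'
        simp only [List.foldl_cons, pvStepA, pvIsHead] at *
        rw [hl']
        simp only [Bool.false_eq_true, if_false]
        rw [ih _ h (cs ++ [line]) hh]
        simp [hc, List.append_assoc, pvIsHead]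

-- A's fold in the preamble phase (no pending heading yet) equals B's walk after dropping the preamble
theorem pvFoldA_preamble (lines : List String) :
    ∀ (cs : List String),
    pvFlushA (lines.foldl pvStepA (PySem.Dict.empty, "", cs)) =
      pvWalk (lines.dropWhile (fun l => !pvIsHead l)) PySem.Dict.empty := by
  induction lines with
  | nil => intro cs; simp [pvFlushA, pvWalk]
  | cons line rest ih =>
      intro cs
      by_cases hl : pvIsHead line = true
      · have hc : PySem.Chars.startswith line.toList ['#', ' '] = true := by
          simpa [pvIsHead] using hl
        simp only [List.foldl_cons, pvStepA, pvIsHead] at *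
        rw [hl]
        simp only [ne_eq, not_true_eq_false, if_false, if_true]
        rw [pvFoldA_pending rest _ line [] hl]
        simp [hc, pvWalk, pvBodyLen, pvIsHead]
      · have hl' : pvIsHead line = false := by simpa using hl
        have hc : PySem.Chars.startswith line.toList ['#', ' '] = false := by
          simpa [pvIsHead] using hl'
        simp only [List.foldl_cons, pvStepA, pvIsHead] at *
        rw [hl']
        simp only [Bool.false_eq_true, if_false]
        rw [ih (cs ++ [line])]
        simp [hc]

-- ===== VERDICT (by name: the statement is the Claim_ definition above) =====
theorem analyze_section_sizes_spec : Claim_equal_analyze_section_sizes := by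
  intro content _
  unfold Spec_analyze_section_sizes analyze_section_sizes analyze_section_sizes_alt
  rw [pvFoldA_preamble]
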